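-- pv_equiv track=rewrite | github.com/robopol/Collatz-conjucture | final_check_collatz.py | compute_S_mod_D
-- ===== SOURCE A (Python) =====
-- from typing import List, Tuple, Iterable, Optional
--
-- def compute_S_mod_D(a: int, b: int, p: Tuple[int, ...], D: int) -> int:
--     s = 0
--     total_mod = 0
--     for k in range(1, a + 1):
--         term = (pow(3, a - k, D) * pow(2, s, D)) % D
--         total_mod = (total_mod + term) % D
--         s += p[k - 1]
--     return total_mod
-- ===== SOURCE B (Python) =====
-- def compute_S_mod_D(a, b, p, D):
--     # prefix exponents s_k = p[0] + ... + p[k-2], collected in one pass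
--     exps = []
--     s = 0
--     for k in range(1, a + 1):
--         exps.append(s)
--         s += p[k - 1]
--     # reverse pass: the running power of 3 replaces pow(3, a-k, D) per term
--     total = 0
--     pow3 = 1
--     for e in reversed(exps):
--         total = (total + pow3 * pow(2, e, D)) % D
--         pow3 = (pow3 * 3) % D
--     return total
-- ===== Notes on version B (the rewrite author's own statement) =====
-- stated objective: alternative
-- what changed: B precomputes the list of prefix-sum exponents in one pass and then runs the summation loop in reverse, replacing the per-iteration pow(3, a-k, D) modular exponentiation by a running power of 3 updated with one multiplication per step; only the pow(2, s, D) call remains per term (intended as faster; a timing run measured only ~1.2-1.4x, below the 1.5x bar).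
import Mathlib
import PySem

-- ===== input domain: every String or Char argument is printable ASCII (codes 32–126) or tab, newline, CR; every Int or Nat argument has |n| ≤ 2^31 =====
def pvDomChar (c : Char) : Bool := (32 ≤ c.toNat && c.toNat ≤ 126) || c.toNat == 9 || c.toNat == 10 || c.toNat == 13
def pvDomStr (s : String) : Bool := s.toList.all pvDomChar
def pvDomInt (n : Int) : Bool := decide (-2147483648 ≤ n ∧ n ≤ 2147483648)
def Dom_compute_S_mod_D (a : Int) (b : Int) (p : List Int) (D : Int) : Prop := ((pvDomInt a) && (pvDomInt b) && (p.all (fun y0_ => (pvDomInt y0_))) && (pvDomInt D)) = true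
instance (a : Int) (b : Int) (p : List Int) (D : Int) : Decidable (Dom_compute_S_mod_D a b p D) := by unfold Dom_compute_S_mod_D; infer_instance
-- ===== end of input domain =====

-- B precomputes the prefix exponents and runs the loop in reverse, replacing the
-- per-iteration pow(3, a-k, D) by a running power of 3 (objective: alternative;
-- intended as faster, but measured only ~1.2-1.4x, below the 1.5x bar); the
-- equivalence of the RETURN value is proved on Pre_ below.

-- Shared helper: exact port of Python's three-argument pow(b, e, m) for m ≠ 0 on the
-- inputs Pre_ admits. For e ≥ 0 it is PySem.Int.powMod. For e < 0 Python raises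
-- ValueError unless gcd(b, m) = 1 and otherwise reduces a modular inverse of b;
-- Int.gcdA b m is such an inverse when gcd(b, m) = 1, and the final Python-mod makes
-- the choice of representative irrelevant, so this is exact there (the gcd ≠ 1 raise
-- region is excluded by Pre_).
def pyPowArb (b e m : Int) : Int :=
  if 0 ≤ e then PySem.Int.powMod b e.toNat m
  else PySem.Int.powMod (Int.gcdA b m) (-e).toNat m

-- ===== PORT A =====
def compute_S_mod_D (a : Int) (b : Int) (p : List Int) (D : Int) : Int :=
  ((PySem.List.pyRange 1 (a+1) 1).foldl
    (fun (st : Int × Int) k =>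
      (st.1 + PySem.List.pyGetD p (k-1) 0,
       PySem.Int.mod (st.2 + PySem.Int.mod (pyPowArb 3 (a-k) D * pyPowArb 2 st.1 D) D) D))
    (0, 0)).2

-- ===== PORT B =====
def compute_S_mod_D_alt (a : Int) (b : Int) (p : List Int) (D : Int) : Int :=
  let exps := ((PySem.List.pyRange 1 (a+1) 1).foldl
      (fun (st : Int × List Int) k => (st.1 + PySem.List.pyGetD p (k-1) 0, st.2 ++ [st.1]))
      (0, ([] : List Int))).2
  (exps.reverse.foldl
      (fun (st : Int × Int) e =>
        (PySem.Int.mod (st.1 + st.2 * pyPowArb 2 e D) D, PySem.Int.mod (st.2 * 3) D))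
      (0, 1)).1

-- ===== PRECONDITION & SPEC =====
-- Pre_ excludes exactly the inputs on which A raises: D = 0 (ValueError in pow),
-- a > len(p) (IndexError), and a negative prefix-sum exponent with even D
-- (pow(2, s, D) with s < 0 needs 2 invertible mod D; ValueError otherwise).
def Pre_compute_S_mod_D (a : Int) (b : Int) (p : List Int) (D : Int) : Prop :=
  D ≠ 0 ∧ a ≤ (p.length : Int) ∧
    ((∃ j ∈ List.range a.toNat, (p.take j).sum < 0) → D % 2 ≠ 0)
instance (a : Int) (b : Int) (p : List Int) (D : Int) : Decidable (Pre_compute_S_mod_D a b p D) := by unfold Pre_compute_S_mod_D; infer_instance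

def pvWitness_compute_S_mod_D : Int × Int × List Int × Int := (3, 0, [1, 2, 3], 5)

def Spec_compute_S_mod_D (a : Int) (b : Int) (p : List Int) (D : Int) (out : Int) : Prop := out = compute_S_mod_D_alt a b p D
instance (a : Int) (b : Int) (p : List Int) (D : Int) (out : Int) : Decidable (Spec_compute_S_mod_D a b p D out) := by unfold Spec_compute_S_mod_D; infer_instance

-- ===== CLAIM (what is proved, stated in full; the proofs are below) =====
def Claim_equal_compute_S_mod_D : Prop := ∀ (a : Int) (b : Int) (p : List Int) (D : Int), Dom_compute_S_mod_D a b p D → Pre_compute_S_mod_D a b p D → Spec_compute_S_mod_D a b p D (compute_S_mod_D a b p D)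

-- ===== LEMMAS AND PROOFS =====

-- the raw (un-reduced) k-th term of A's sum, k = i+1
def pvU (p : List Int) (D a : Int) (i : Nat) : Int :=
  pyPowArb 3 (a - 1 - (i : Int)) D * pyPowArb 2 ((p.take i).sum) D

-- Horner value of B's second loop: bsum (e :: es) = 2^e-term + 3 * bsum es
def pvBsum (D : Int) : List Int → Int
  | [] => 0
  | e :: es => pyPowArb 2 e D + 3 * pvBsum D es

lemma pymod_modEq (x D : Int) : PySem.Int.mod x D ≡ x [ZMOD D] := by
  have h := PySem.Int.floordiv_mul_add_mod x D
  have hdvd : D ∣ x - PySem.Int.mod x D := ⟨PySem.Int.floordiv x D, by linarith⟩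
  exact (Int.modEq_iff_dvd.mpr hdvd)

lemma pymod_congr {x y D : Int} (hD : D ≠ 0) (h : x ≡ y [ZMOD D]) :
    PySem.Int.mod x D = PySem.Int.mod y D := by
  have h1 : PySem.Int.mod x D ≡ PySem.Int.mod y D [ZMOD D] :=
    (pymod_modEq x D).trans (h.trans (pymod_modEq y D).symm)
  have hdvd : |D| ∣ PySem.Int.mod y D - PySem.Int.mod x D := (abs_dvd _ _).mpr h1.dvd
  rcases lt_or_gt_of_ne hD with hneg | hpos
  · have b1 := PySem.Int.mod_neg_bounds x (b := D) hneg
    have b2 := PySem.Int.mod_neg_bounds y (b := D) hneg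
    have := Int.eq_zero_of_abs_lt_dvd hdvd (by rw [abs_of_neg hneg]; rw [abs_lt]; omega)
    omega
  · have b1 := PySem.Int.mod_nonneg x (b := D) hpos
    have b2 := PySem.Int.mod_lt x (b := D) hpos
    have b3 := PySem.Int.mod_nonneg y (b := D) hpos
    have b4 := PySem.Int.mod_lt y (b := D) hpos
    have := Int.eq_zero_of_abs_lt_dvd hdvd (by rw [abs_of_pos hpos]; rw [abs_lt]; omega)
    omega

lemma sum_modEq {D : Int} (s : Finset ℕ) (f g : ℕ → Int)
    (h : ∀ i ∈ s, f i ≡ g i [ZMOD D]) :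
    (∑ i ∈ s, f i) ≡ (∑ i ∈ s, g i) [ZMOD D] := by
  unfold Int.ModEq
  rw [Finset.sum_int_mod s D f, Finset.sum_int_mod s D g]
  rw [Finset.sum_congr rfl h]

-- A's loop: state after m iterations
lemma aloop (p : List Int) (D a : Int) (hD : D ≠ 0) :
    ∀ (m : Nat), (m : Int) ≤ (p.length : Int) →
    ((PySem.List.pyRange 1 ((m : Int)+1) 1).foldl
      (fun (st : Int × Int) k =>
        (st.1 + PySem.List.pyGetD p (k-1) 0,
         PySem.Int.mod (st.2 + PySem.Int.mod (pyPowArb 3 (a-k) D * pyPowArb 2 st.1 D) D) D))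
      (0, 0))
    = ((p.take m).sum,
       if m = 0 then 0 else PySem.Int.mod (∑ i ∈ Finset.range m, pvU p D a i) D) := by
  intro m
  induction m with
  | zero =>
      intro _
      rw [PySem.List.pyRange_one_eq_nil (by omega)]
      simp
  | succ m ih =>
      intro hlen
      have hm : (m : Int) ≤ (p.length : Int) := by push_cast at hlen ⊢; omega
      have hmlt : m < p.length := by push_cast at hlen; omega
      have hcast : ((m + 1 : Nat) : Int) + 1 = ((m : Int) + 1) + 1 := by push_cast; ring
      rw [hcast, PySem.List.pyRange_one_succ_right (by omega), List.foldl_append, ih hm]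
      have hidx : (m : Int) + 1 - 1 = ((m : Nat) : Int) := by ring
      have hget : PySem.List.pyGetD p ((m : Int) + 1 - 1) 0 = p[m] := by
        rw [hidx, PySem.List.pyGetD_natCast, List.getD_eq_getElem?_getD,
            List.getElem?_eq_getElem hmlt]
        rfl
      have hsum : (p.take (m+1)).sum = (p.take m).sum + p[m] :=
        List.sum_take_succ p m hmlt
      have hexp : a - ((m : Int) + 1) = a - 1 - (m : Int) := by ring
      simp only [List.foldl_cons, List.foldl_nil]
      refine Prod.ext ?_ ?_
      · rw [hget]; exact hsum.symm
      · simp only []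
        rw [hexp]
        rcases Nat.eq_zero_or_pos m with hm0 | hmpos
        · subst hm0
          simp only [if_neg (Nat.succ_ne_zero 0)]
          refine pymod_congr hD ?_
          have : (∑ i ∈ Finset.range 1, pvU p D a i) = pvU p D a 0 := by
            simp
          rw [this]
          simpa [pvU] using ((pymod_modEq (pvU p D a 0) D).add_left 0)
        · rw [if_neg (by omega), if_neg (by omega)]
          refine pymod_congr hD ?_
          rw [Finset.sum_range_succ]
          exact ((pymod_modEq _ D).add
            ((pymod_modEq (pvU p D a m) D))).trans (by rw [pvU])

-- B's first loop: prefix-sum list and final running sum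
lemma bloop1 (p : List Int) :
    ∀ (m : Nat), (m : Int) ≤ (p.length : Int) →
    ((PySem.List.pyRange 1 ((m : Int)+1) 1).foldl
      (fun (st : Int × List Int) k => (st.1 + PySem.List.pyGetD p (k-1) 0, st.2 ++ [st.1]))
      (0, ([] : List Int)))
    = ((p.take m).sum, (List.range m).map (fun i => (p.take i).sum)) := by
  intro m
  induction m with
  | zero =>
      intro _
      rw [PySem.List.pyRange_one_eq_nil (by omega)]
      simp
  | succ m ih =>
      intro hlen
      have hm : (m : Int) ≤ (p.length : Int) := by push_cast at hlen ⊢; omega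
      have hmlt : m < p.length := by push_cast at hlen; omega
      have hcast : ((m + 1 : Nat) : Int) + 1 = ((m : Int) + 1) + 1 := by push_cast; ring
      rw [hcast, PySem.List.pyRange_one_succ_right (by omega), List.foldl_append, ih hm]
      have hidx : (m : Int) + 1 - 1 = ((m : Nat) : Int) := by ring
      have hget : PySem.List.pyGetD p ((m : Int) + 1 - 1) 0 = p[m] := by
        rw [hidx, PySem.List.pyGetD_natCast, List.getD_eq_getElem?_getD,
            List.getElem?_eq_getElem hmlt]
        rfl
      have hsum : (p.take (m+1)).sum = (p.take m).sum + p[m] :=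
        List.sum_take_succ p m hmlt
      simp only [List.foldl_cons, List.foldl_nil]
      refine Prod.ext ?_ ?_
      · rw [hget]; exact hsum.symm
      · simp [List.range_succ]

-- B's second loop computes a Python-mod of the Horner value pvBsum
lemma bloop2 (D : Int) (hD : D ≠ 0) :
    ∀ (L : List Int) (t q : Int),
    (L.foldl
      (fun (st : Int × Int) e =>
        (PySem.Int.mod (st.1 + st.2 * pyPowArb 2 e D) D, PySem.Int.mod (st.2 * 3) D))
      (t, q)).1
    = if L = [] then t else PySem.Int.mod (t + q * pvBsum D L) D := by
  intro L
  induction L with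
  | nil => intro t q; simp
  | cons e es ih =>
      intro t q
      rw [List.foldl_cons, ih]
      rcases eq_or_ne es ([] : List Int) with hes | hes
      · subst hes
        rw [if_pos rfl, if_neg (List.cons_ne_nil e [])]
        have h0 : pvBsum D [e] = pyPowArb 2 e D + 3 * pvBsum D [] := rfl
        have h1 : pvBsum D ([] : List Int) = 0 := rfl
        rw [h0, h1]
        ring_nf
      · rw [if_neg hes, if_neg (List.cons_ne_nil e es)]
        refine pymod_congr hD ?_
        rw [pvBsum]
        calc PySem.Int.mod (t + q * pyPowArb 2 e D) D + PySem.Int.mod (q * 3) D * pvBsum D es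
            ≡ (t + q * pyPowArb 2 e D) + (q * 3) * pvBsum D es [ZMOD D] :=
              (pymod_modEq _ D).add ((pymod_modEq (q * 3) D).mul_right _)
          _ = t + q * (pyPowArb 2 e D + 3 * pvBsum D es) := by ring

-- Horner value of the reversed prefix-exponent list as a Finset sum
lemma bsum_rev (D : Int) (g : ℕ → Int) :
    ∀ (n : Nat), pvBsum D (((List.range n).map g).reverse)
      = ∑ i ∈ Finset.range n, 3 ^ (n - 1 - i) * pyPowArb 2 (g i) D := by
  intro n
  induction n with
  | zero => simp [pvBsum]
  | succ n ih =>
      rw [List.range_succ, List.map_append, List.reverse_append]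
      simp only [List.map_cons, List.map_nil, List.reverse_cons, List.reverse_nil,
        List.nil_append, List.cons_append]
      rw [pvBsum, ih, Finset.sum_range_succ]
      have hlast : (n + 1) - 1 - n = 0 := by omega
      rw [hlast, pow_zero, one_mul]
      have hshift : (∑ i ∈ Finset.range n, 3 ^ ((n + 1) - 1 - i) * pyPowArb 2 (g i) D)
          = 3 * ∑ i ∈ Finset.range n, 3 ^ (n - 1 - i) * pyPowArb 2 (g i) D := by
        rw [Finset.mul_sum]
        refine Finset.sum_congr rfl ?_
        intro i hi
        have hi' := Finset.mem_range.mp hi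
        have : (n + 1) - 1 - i = (n - 1 - i) + 1 := by omega
        rw [this, pow_succ]
        ring
      rw [hshift]
      ring

-- ===== VERDICT (by name: the statement is the Claim_ definition above) =====
theorem compute_S_mod_D_spec : Claim_equal_compute_S_mod_D := by
  intro a b p D hdom hpre
  obtain ⟨hD, hlen, _⟩ := hpre
  unfold Spec_compute_S_mod_D compute_S_mod_D compute_S_mod_D_alt
  by_cases ha : a + 1 ≤ 1
  · rw [PySem.List.pyRange_one_eq_nil ha]
    simp
  · set n := a.toNat with hn
    have hna : (n : Int) = a := by omega
    have hnpos : 0 < n := by omega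
    have hb : a + 1 = ((n : Int)) + 1 := by omega
    rw [hb]
    have hlen' : (n : Int) ≤ (p.length : Int) := by omega
    rw [aloop p D a hD n hlen', bloop1 p n hlen']
    simp only []
    rw [bloop2 D hD]
    have hne : (((List.range n).map (fun i => (p.take i).sum)).reverse) ≠ [] := by
      simp [List.range_eq_nil]
      omega
    rw [if_neg hne, if_neg (by omega : n ≠ 0)]
    rw [bsum_rev D (fun i => (p.take i).sum) n]
    have hz : (0 : Int) + 1 * (∑ i ∈ Finset.range n, 3 ^ (n - 1 - i) * pyPowArb 2 ((p.take i).sum) D)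
        = ∑ i ∈ Finset.range n, 3 ^ (n - 1 - i) * pyPowArb 2 ((p.take i).sum) D := by ring
    rw [hz]
    refine pymod_congr hD ?_
    refine sum_modEq (Finset.range n) _ _ ?_
    intro i hi
    have hi' := Finset.mem_range.mp hi
    have hexp : (0 : Int) ≤ a - 1 - (i : Int) := by omega
    have hnat : (a - 1 - (i : Int)).toNat = n - 1 - i := by omega
    rw [pvU, pyPowArb, if_pos hexp, hnat, PySem.Int.powMod]
    exact ((pymod_modEq ((3 : Int) ^ (n - 1 - i)) D).mul_right _)
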